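-- pv_equiv track=rewrite | github.com/BJCaie/tDCS_FEF | behaviour.py | separate_paths
-- ===== SOURCE A (Python) =====
-- from collections import defaultdict
--
-- def separate_paths(p, s = '', c = None):
--    d = defaultdict(list)
--    for a, *b in p:
--       d[a].extend(b if not b else [b])
--    if c is None or len(d) == 1:
--       yield from [j for a, b in d.items() for j in separate_paths(b, s=s+a+'_', c=c if c is not None else len(b))]
--    else:
--       yield from [s]*c
-- ===== SOURCE B (Python) =====
-- def _group(p):
--     d = {}
--     for a, *b in p:
--         d.setdefault(a, [])
--         if b:
--             d[a].append(b)
--     return d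
--
-- def _tail(p, s, c):
--     # follow single-group chains iteratively; emit s repeated c times at the first non-unary node
--     while True:
--         d = _group(p)
--         if len(d) == 1:
--             (a, g), = d.items()
--             s += a + '_'
--             p = g
--         else:
--             return [s] * c
--
-- def separate_paths(p, s='', c=None):
--     if c is None:
--         for a, g in _group(p).items():
--             yield from _tail(g, s + a + '_', len(g))
--     else:
--         yield from _tail(p, s, c)
-- ===== Notes on version B (the rewrite author's own statement) =====
-- stated objective: alternative
-- what changed: Replaces the uniform recursive generator by a two-phase scheme: one top-level split over the groups (only when c is None), then an iterative while-loop that chases single-group chains accumulating the prefix and emits [s]*c at the first non-unary node, with no recursion or stack.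
import Mathlib
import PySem

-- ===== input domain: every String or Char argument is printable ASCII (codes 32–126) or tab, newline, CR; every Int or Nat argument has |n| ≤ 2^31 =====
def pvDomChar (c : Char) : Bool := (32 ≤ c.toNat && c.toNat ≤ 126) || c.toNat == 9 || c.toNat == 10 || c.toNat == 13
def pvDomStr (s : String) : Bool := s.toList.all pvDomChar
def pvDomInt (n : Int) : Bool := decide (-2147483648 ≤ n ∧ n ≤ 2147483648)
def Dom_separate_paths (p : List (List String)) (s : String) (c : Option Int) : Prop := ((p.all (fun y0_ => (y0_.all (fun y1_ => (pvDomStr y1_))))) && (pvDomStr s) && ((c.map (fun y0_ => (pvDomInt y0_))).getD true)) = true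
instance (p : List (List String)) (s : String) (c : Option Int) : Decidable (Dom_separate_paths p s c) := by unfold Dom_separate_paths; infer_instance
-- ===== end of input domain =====

-- B replaces A's uniform recursive generator by a two-phase scheme: a single top-level
-- split over the groups (only when c is None), then an iterative loop that chases
-- single-group chains and emits [s]*c at the first non-unary node. Return-value
-- equivalence only — both are generators in Python, compared as the list of yields.
-- Both ports carry a fuel argument as a pure totality guard; fuel pvW p + 1 always suffices.

-- ===== PORT A =====
-- weight of an input: one plus the length of each path, summed (totality guard only)
def pvW (p : List (List String)) : Nat := (p.map (fun q => q.length + 1)).sum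

-- 'd[a].extend(b if not b else [b])' on an insertion-ordered assoc list
-- (hand port of defaultdict(list): accessing a missing key creates an empty entry; exact)
def pvUpsert (d : List (String × List (List String))) (a : String) (t : List String) :
    List (String × List (List String)) :=
  match d with
  | [] => [(a, if t.isEmpty then [] else [t])]
  | (k, v) :: rest =>
    if k = a then (k, v ++ (if t.isEmpty then [] else [t])) :: rest
    else (k, v) :: pvUpsert rest a t

-- the grouping loop 'for a, *b in p: d[a].extend(...)'; an empty path raises in Python
-- (ValueError) and Pre_ excludes it, here it is skipped
def pvGroup (p : List (List String)) : List (String × List (List String)) :=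
  p.foldl (fun d path => match path with
    | [] => d
    | a :: t => pvUpsert d a t) []

-- A's recursion, with fuel as totality guard (proved sufficient below: pvGoA_fuel)
def pvGoA : Nat → List (List String) → String → Option Int → List String
  | 0, _, _, _ => []
  | f + 1, p, s, c =>
    if c = none ∨ (pvGroup p).length = 1 then
      (pvGroup p).flatMap (fun ab =>
        pvGoA f ab.2 (s ++ ab.1 ++ "_") (some (c.getD (ab.2.length : Int))))
    else
      List.replicate (c.getD 0).toNat s

def separate_paths (p : List (List String)) (s : String) (c : Option Int) : List String :=
  pvGoA (pvW p + 1) p s c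

-- ===== PORT B =====
-- 'd.setdefault(a, [])' on an insertion-ordered assoc list (new keys append at the end)
def pvSetdefault (d : List (String × List (List String))) (a : String) :
    List (String × List (List String)) :=
  if d.any (fun kv => kv.1 == a) then d else d ++ [(a, [])]

-- 'd[a].append(b)' on the existing key a
def pvAppendAt (d : List (String × List (List String))) (a : String) (b : List String) :
    List (String × List (List String)) :=
  d.map (fun kv => if kv.1 = a then (kv.1, kv.2 ++ [b]) else kv)

-- B's helper _group: setdefault, then append the tail only when it is nonempty
def pvGroupB (p : List (List String)) : List (String × List (List String)) :=
  p.foldl (fun d path => match path with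
    | [] => d
    | a :: b =>
      let d' := pvSetdefault d a
      if b.isEmpty then d' else pvAppendAt d' a b) []

-- B's helper _tail: the while-loop chasing single-group chains; fuel counts iterations
-- (pvW p + 1 always suffices, proved below: pvTail_eq_goA)
def pvTail : Nat → List (List String) → String → Int → List String
  | 0, _, _, _ => []
  | f + 1, p, s, c =>
    match pvGroupB p with
    | [(a, g)] => pvTail f g (s ++ a ++ "_") c
    | _ => List.replicate c.toNat s

def separate_paths_alt (p : List (List String)) (s : String) (c : Option Int) : List String :=
  match c with
  | none => (pvGroupB p).flatMap (fun ag =>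
      pvTail (pvW ag.2 + 1) ag.2 (s ++ ag.1 ++ "_") (ag.2.length : Int))
  | some k => pvTail (pvW p + 1) p s k

-- ===== PRECONDITION & SPEC =====
-- Pre_ excludes a p containing an empty path, on which A's 'for a, *b in p' raises ValueError.
def Pre_separate_paths (p : List (List String)) (s : String) (c : Option Int) : Prop :=
  ∀ path ∈ p, path ≠ []
instance (p : List (List String)) (s : String) (c : Option Int) : Decidable (Pre_separate_paths p s c) := by unfold Pre_separate_paths; infer_instance

def pvWitness_separate_paths : List (List String) × String × Option Int :=
  ([["x", "y"], ["x", "z"], ["q"]], "", none)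

def Spec_separate_paths (p : List (List String)) (s : String) (c : Option Int) (out : List String) : Prop := out = separate_paths_alt p s c
instance (p : List (List String)) (s : String) (c : Option Int) (out : List String) : Decidable (Spec_separate_paths p s c out) := by unfold Spec_separate_paths; infer_instance

-- ===== CLAIM (what is proved, stated in full; the proofs are below) =====
def Claim_equal_separate_paths : Prop := ∀ (p : List (List String)) (s : String) (c : Option Int), Dom_separate_paths p s c → Pre_separate_paths p s c → Spec_separate_paths p s c (separate_paths p s c)

-- ===== LEMMAS AND PROOFS =====
def pvSumW (d : List (String × List (List String))) : Nat :=
  (d.map (fun kv => pvW kv.2)).sum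

theorem pvUpsert_bound (d : List (String × List (List String))) (a : String) (t : List String) :
    pvSumW (pvUpsert d a t) + (pvUpsert d a t).length ≤ pvSumW d + d.length + (t.length + 2) := by
  induction d with
  | nil =>
    simp [pvUpsert, pvSumW, pvW]
    cases t <;> simp
  | cons kv rest ih =>
    obtain ⟨k, v⟩ := kv
    by_cases h : k = a
    · simp [pvUpsert, h, pvSumW, pvW]
      cases t <;> simp <;> omega
    · simp [pvUpsert, h, pvSumW] at ih ⊢
      omega

theorem pvGroup_bound_aux (p : List (List String)) :
    ∀ d, pvSumW (p.foldl (fun d path => match path with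
      | [] => d
      | a :: t => pvUpsert d a t) d) +
      (p.foldl (fun d path => match path with
      | [] => d
      | a :: t => pvUpsert d a t) d).length ≤ pvSumW d + d.length + pvW p := by
  induction p with
  | nil => intro d; simp [pvW]
  | cons path rest ih =>
    intro d
    cases path with
    | nil =>
      have := ih d
      simp [List.foldl, pvW, List.map, List.sum_cons] at this ⊢
      omega
    | cons a t =>
      have h1 := ih (pvUpsert d a t)
      have h2 := pvUpsert_bound d a t
      simp [List.foldl, pvW, List.map, List.sum_cons] at h1 ⊢
      omega

theorem pvGroup_bound (p : List (List String)) :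
    pvSumW (pvGroup p) + (pvGroup p).length ≤ pvW p := by
  have := pvGroup_bound_aux p []
  simpa [pvGroup, pvSumW] using this

theorem pvW_le_sum (d : List (String × List (List String)))
    (ab : String × List (List String)) (h : ab ∈ d) : pvW ab.2 ≤ pvSumW d := by
  induction d with
  | nil => simp at h
  | cons kv rest ih =>
    rcases List.mem_cons.mp h with h' | h'
    · subst h'; simp [pvSumW]
    · have := ih h'; simp [pvSumW] at this ⊢; omega

theorem pvW_lt_of_mem (p : List (List String)) (ab : String × List (List String))
    (h : ab ∈ pvGroup p) : pvW ab.2 < pvW p := by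
  have h1 := pvW_le_sum (pvGroup p) ab h
  have h2 := pvGroup_bound p
  have h3 : 1 ≤ (pvGroup p).length := List.length_pos_of_mem h
  omega

theorem pvFlatMap_congr_mem {α β : Type} (l : List α) (f g : α → List β)
    (h : ∀ a ∈ l, f a = g a) : l.flatMap f = l.flatMap g := by
  induction l with
  | nil => rfl
  | cons a r ih =>
    simp only [List.flatMap_cons]
    rw [h a (List.mem_cons_self), ih (fun a ha => h a (List.mem_cons_of_mem _ ha))]

theorem pvW_zero (p : List (List String)) (h : pvW p = 0) : p = [] := by
  cases p with
  | nil => rfl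
  | cons q r => simp [pvW] at h

-- fuel irrelevance for A's port: any fuel above pvW p gives the same value
theorem pvGoA_fuel (n : Nat) : ∀ (p : List (List String)) (s : String) (c : Option Int)
    (f g : Nat), pvW p ≤ n → pvW p < f → pvW p < g → pvGoA f p s c = pvGoA g p s c := by
  induction n with
  | zero =>
    intro p s c f g h hf hg
    have hp : p = [] := pvW_zero p (by omega)
    subst hp
    cases f with
    | zero => omega
    | succ f' =>
      cases g with
      | zero => omega
      | succ g' => simp [pvGoA, pvGroup]
  | succ n ih =>
    intro p s c f g h hf hg
    cases f with
    | zero => omega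
    | succ f' =>
      cases g with
      | zero => omega
      | succ g' =>
        simp only [pvGoA]
        by_cases hc : c = none ∨ (pvGroup p).length = 1
        · simp only [hc, if_pos]
          apply pvFlatMap_congr_mem
          intro ab hab
          have hlt := pvW_lt_of_mem p ab hab
          exact ih ab.2 _ _ f' g' (by omega) (by omega) (by omega)
        · simp only [hc, if_false]

-- B's grouping builds the same assoc list as A's: step equality under unique keys
theorem pvAppendAt_id (d : List (String × List (List String))) (a : String) (b : List String)
    (h : ∀ kv ∈ d, kv.1 ≠ a) : pvAppendAt d a b = d := by
  induction d with
  | nil => rfl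
  | cons kv rest ih =>
    have h1 := h kv (List.mem_cons_self)
    simp [pvAppendAt, h1] at ih ⊢
    exact ih (fun k' v' h' => h (k', v') (List.mem_cons_of_mem _ h'))

theorem pvUpsert_keys (d : List (String × List (List String))) (a : String) (t : List String) :
    (pvUpsert d a t).map Prod.fst =
    if d.any (fun kv => kv.1 == a) then d.map Prod.fst else d.map Prod.fst ++ [a] := by
  induction d with
  | nil => simp [pvUpsert]
  | cons kv rest ih =>
    obtain ⟨k, v⟩ := kv
    by_cases h : k = a
    · simp [pvUpsert, h]
    · have hk : (k == a) = false := by simp [h]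
      simp only [pvUpsert, if_neg h, List.map_cons, List.any_cons, hk, Bool.false_or, ih]
      by_cases hm : rest.any (fun kv => kv.1 == a) <;> simp [hm]

theorem pvUpsert_keys_nodup (d : List (String × List (List String))) (a : String)
    (t : List String) (hd : (d.map Prod.fst).Nodup) :
    ((pvUpsert d a t).map Prod.fst).Nodup := by
  rw [pvUpsert_keys]
  by_cases hm : d.any (fun kv => kv.1 == a)
  · rw [if_pos hm]; exact hd
  · have ha : a ∉ d.map Prod.fst := by
      intro hmem
      apply hm
      rcases List.mem_map.mp hmem with ⟨kv, hkv, hk⟩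
      exact List.any_eq_true.mpr ⟨kv, hkv, beq_iff_eq.mpr hk⟩
    rw [if_neg hm]
    refine List.Nodup.append hd (List.nodup_singleton a) ?_
    intro x hx hx'
    have hxa : x = a := by simpa using hx'
    exact ha (hxa ▸ hx)

theorem pvStep_eq (d : List (String × List (List String))) (a : String) (t : List String)
    (hd : (d.map Prod.fst).Nodup) :
    (let d' := pvSetdefault d a;
     if t.isEmpty then d' else pvAppendAt d' a t) = pvUpsert d a t := by
  induction d with
  | nil =>
    simp [pvSetdefault, pvAppendAt, pvUpsert]
    cases t <;> simp
  | cons kv rest ih =>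
    obtain ⟨k, v⟩ := kv
    simp only [List.map_cons, List.nodup_cons] at hd
    by_cases h : k = a
    · subst h
      have hrest : ∀ kv' ∈ rest, kv'.1 ≠ k := by
        intro kv' h' he
        exact hd.1 (he ▸ List.mem_map_of_mem h')
      simp only [pvSetdefault, pvUpsert, List.any_cons, beq_self_eq_true, Bool.true_or,
        if_pos, if_true]
      cases t with
      | nil => simp only [List.isEmpty_nil, if_true, List.append_nil]
      | cons x xs =>
        simp only [List.isEmpty_cons, Bool.false_eq_true, if_false, pvAppendAt,
          List.map_cons, if_pos rfl]
        rw [show (rest.map fun kv => if kv.1 = k then (kv.1, kv.2 ++ [x :: xs]) else kv)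
            = pvAppendAt rest k (x :: xs) from rfl, pvAppendAt_id rest k (x :: xs) hrest]
        simp
    · have ihr := ih hd.2
      have hk : (k == a) = false := by simp [h]
      simp only [pvSetdefault, List.any_cons, hk, Bool.false_or] at ihr ⊢
      simp only [pvUpsert, if_neg h]
      by_cases hmem : rest.any (fun kv => kv.1 == a)
      · simp only [hmem, if_true] at ihr ⊢
        cases ht : t.isEmpty with
        | true => simp only [ht, if_true] at ihr ⊢; rw [← ihr]
        | false =>
          simp only [ht, Bool.false_eq_true, if_false] at ihr ⊢
          simp only [pvAppendAt, List.map_cons, if_neg h]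
          rw [← ihr]
          rfl
      · simp only [hmem, Bool.false_eq_true, if_false] at ihr ⊢
        cases ht : t.isEmpty with
        | true =>
          simp only [ht, if_true] at ihr ⊢
          rw [List.cons_append, ← ihr]
        | false =>
          simp only [ht, Bool.false_eq_true, if_false] at ihr ⊢
          simp only [pvAppendAt, List.map_cons, List.cons_append, if_neg h]
          rw [← ihr]
          simp [pvAppendAt]

theorem pvGroupB_eq_aux (p : List (List String)) :
    ∀ d, (d.map Prod.fst).Nodup →
      p.foldl (fun d path => match path with
        | [] => d
        | a :: b =>
          let d' := pvSetdefault d a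
          if b.isEmpty then d' else pvAppendAt d' a b) d =
      p.foldl (fun d path => match path with
        | [] => d
        | a :: t => pvUpsert d a t) d := by
  induction p with
  | nil => intro d _; rfl
  | cons path rest ih =>
    intro d hd
    cases path with
    | nil => exact ih d hd
    | cons a t =>
      simp only [List.foldl_cons]
      rw [pvStep_eq d a t hd]
      exact ih _ (pvUpsert_keys_nodup d a t hd)

theorem pvGroupB_eq (p : List (List String)) : pvGroupB p = pvGroup p := by
  have := pvGroupB_eq_aux p [] (by simp)
  simpa [pvGroupB, pvGroup] using this

-- the chain-chasing loop computes A's recursion once the count is fixed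
theorem pvTail_eq_goA (n : Nat) : ∀ (p : List (List String)) (s : String) (c : Int)
    (f : Nat), pvW p ≤ n → pvW p < f → pvTail f p s c = pvGoA f p s (some c) := by
  induction n with
  | zero =>
    intro p s c f h hf
    have hp : p = [] := pvW_zero p (by omega)
    subst hp
    cases f with
    | zero => omega
    | succ f' => simp [pvTail, pvGoA, pvGroupB_eq, pvGroup]
  | succ n ih =>
    intro p s c f h hf
    cases f with
    | zero => omega
    | succ f' =>
      simp only [pvTail, pvGroupB_eq]
      match hg : pvGroup p with
      | [(a, g)] =>
        have hmem : (a, g) ∈ pvGroup p := by rw [hg]; exact List.mem_cons_self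
        have hlt : pvW g < pvW p := pvW_lt_of_mem p (a, g) hmem
        simp only [pvGoA, hg, List.length_cons, List.length_nil, or_true,
          if_true, List.flatMap_cons, List.flatMap_nil, List.append_nil, Option.getD_some]
        exact ih g _ c f' (by omega) (by omega)
      | [] =>
        simp [pvGoA, hg]
      | (x :: y :: r) =>
        have hcond : ¬ ((some c : Option Int) = none ∨ (pvGroup p).length = 1) := by
          rw [hg]; simp
        simp only [pvGoA, if_neg hcond, Option.getD_some]

theorem ports_agree (p : List (List String)) (s : String) (c : Option Int) :
    separate_paths p s c = separate_paths_alt p s c := by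
  cases c with
  | some k =>
    show pvGoA (pvW p + 1) p s (some k) = pvTail (pvW p + 1) p s k
    exact (pvTail_eq_goA (pvW p) p s k (pvW p + 1) (le_refl _) (by omega)).symm
  | none =>
    show pvGoA (pvW p + 1) p s none = separate_paths_alt p s none
    simp only [separate_paths_alt, pvGroupB_eq]
    simp only [pvGoA, true_or, if_pos, Option.getD_none]
    apply pvFlatMap_congr_mem
    intro ab hab
    have hlt := pvW_lt_of_mem p ab hab
    rw [pvGoA_fuel (pvW ab.2) ab.2 _ _ (pvW p) (pvW ab.2 + 1) (le_refl _) (by omega) (by omega)]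
    exact (pvTail_eq_goA (pvW ab.2) ab.2 _ _ (pvW ab.2 + 1) (le_refl _) (by omega)).symm

-- ===== VERDICT (by name: the statement is the Claim_ definition above) =====
theorem separate_paths_spec : Claim_equal_separate_paths := by
  intro p s c _ _
  exact ports_agree p s c
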